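-- pv_equiv track=rewrite | github.com/akeemjones/my-math-roots | scripts/fix_u7_visuals.py | extract_t_fields
-- ===== SOURCE A (Python) =====
-- def extract_t_fields(content):
--     """
--     Walk through JS content extracting all "t":"..." positions.
--     Returns list of (start_of_value, end_of_value, text) where positions
--     refer to the content string (including the quotes).
--     """
--     results = []
--     i = 0
--     while i < len(content):
--         idx = content.find('"t":', i)
--         if idx == -1:
--             break
--         # find opening quote of value
--         start = content.find('"', idx + 4)
--         if start == -1:
--             break
--         # find closing quote (handle escapes)
--         j = start + 1
--         while j < len(content):
--             ch = content[j]
--             if ch == "\\":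
--                 j += 2
--                 continue
--             if ch == '"':
--                 break
--             j += 1
--         # start and j are positions of the opening/closing quotes
--         results.append((start, j, content[start+1:j]))
--         i = j + 1
--     return results
-- ===== SOURCE B (Python) =====
-- def extract_t_fields(content):
--     """Single left-to-right state-machine pass (no repeated str.find calls)."""
--     results = []
--     n = len(content)
--     pos = 0
--     mode = 0  # 0: seeking '"t":' marker, 1: seeking opening quote, 2: inside value
--     start = 0
--     while pos < n:
--         c = content[pos]
--         if mode == 0:
--             if c == '"' and content[pos:pos + 4] == '"t":':
--                 mode = 1
--                 pos += 4
--             else: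
--                 pos += 1
--         elif mode == 1:
--             if c == '"':
--                 start = pos
--                 mode = 2
--             pos += 1
--         else:
--             if c == "\\":
--                 pos += 2
--             elif c == '"':
--                 results.append((start, pos, content[start + 1:pos]))
--                 mode = 0
--                 pos += 1
--             else:
--                 pos += 1
--     if mode == 2:
--         results.append((start, pos, content[start + 1:pos]))
--     return results
-- ===== Notes on version B (the rewrite author's own statement) =====
-- stated objective: alternative
-- what changed: Replaces A's outer loop of repeated str.find calls plus a separate escape-scanning inner loop with a single left-to-right three-state automaton pass (seek marker / seek opening quote / consume value) that builds the results in one traversal.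
import Mathlib
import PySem

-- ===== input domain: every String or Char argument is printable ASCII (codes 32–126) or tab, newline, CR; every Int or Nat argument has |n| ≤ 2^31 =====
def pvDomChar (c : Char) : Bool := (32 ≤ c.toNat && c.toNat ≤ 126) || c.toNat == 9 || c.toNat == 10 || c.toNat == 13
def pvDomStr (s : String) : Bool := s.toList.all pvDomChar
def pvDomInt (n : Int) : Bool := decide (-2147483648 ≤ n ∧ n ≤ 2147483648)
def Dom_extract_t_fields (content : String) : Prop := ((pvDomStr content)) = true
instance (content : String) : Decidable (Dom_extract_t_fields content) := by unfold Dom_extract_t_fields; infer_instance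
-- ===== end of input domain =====

-- B replaces A's repeated str.find scanning with one left-to-right three-state pass; objective: alternative (not faster).

-- ===== PORT A =====
-- inner `while j < len(content): …` scanning for the closing quote, handling escapes
def aClose (s : List Char) (j : Nat) : Nat :=
  if h : j < s.length then
    if s[j] = '\\' then aClose s (j + 2)
    else if s[j] = '"' then j
    else aClose s (j + 1)
  else j
termination_by s.length - j
decreasing_by all_goals omega

-- the two find calls of one outer iteration: `content.find('"t":', i)` then `content.find('"', idx+4)`;
-- returns the opening-quote position, or none where A breaks
def aStep? (s : List Char) (i : Nat) : Option Nat :=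
  let idx := PySem.Chars.findFrom s ['"', 't', '"', ':'] (i : Int) none
  if idx = -1 then none
  else
    let st := PySem.Chars.findFrom s ['"'] (idx + 4) none
    if st = -1 then none else some st.toNat

-- outer `while i < len(content)` loop of A, building the results list
-- (fuel is a totality guard only: the loop advances i by at least 5 per iteration, so length+1 fuel never runs out)
def aOuter (s : List Char) (fuel : Nat) (i : Nat) : List (Int × Int × String) :=
  match fuel with
  | 0 => []
  | fuel + 1 =>
    if i < s.length then
      match aStep? s i with
      | none => []
      | some st =>
        ((st : Int), ((aClose s (st + 1) : Nat) : Int),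
          String.ofList (PySem.List.slice s (some ((st : Int) + 1)) (some ((aClose s (st + 1) : Nat) : Int))))
          :: aOuter s fuel (aClose s (st + 1) + 1)
    else []

def extract_t_fields (content : String) : List (Int × Int × String) :=
  aOuter content.toList (content.toList.length + 1) 0

-- ===== PORT B =====
-- single-pass automaton: mode 0 = seeking '"t":', mode 1 = seeking opening quote, mode 2 = inside value
def bLoop (s : List Char) (pos mode start : Nat) (acc : List (Int × Int × String)) :
    List (Int × Int × String) :=
  if h : pos < s.length then
    if mode = 0 then
      if s[pos] = '"' ∧ PySem.List.slice s (some (pos : Int)) (some ((pos : Int) + 4)) = ['"', 't', '"', ':'] then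
        bLoop s (pos + 4) 1 start acc
      else bLoop s (pos + 1) 0 start acc
    else if mode = 1 then
      if s[pos] = '"' then bLoop s (pos + 1) 2 pos acc
      else bLoop s (pos + 1) 1 start acc
    else
      if s[pos] = '\\' then bLoop s (pos + 2) 2 start acc
      else if s[pos] = '"' then
        bLoop s (pos + 1) 0 start
          (acc ++ [((start : Int), (pos : Int),
            String.ofList (PySem.List.slice s (some ((start : Int) + 1)) (some (pos : Int))))])
      else bLoop s (pos + 1) 2 start acc
  else
    if mode = 2 then
      acc ++ [((start : Int), (pos : Int),
        String.ofList (PySem.List.slice s (some ((start : Int) + 1)) (some (pos : Int))))]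
    else acc
termination_by s.length - pos
decreasing_by all_goals omega

def extract_t_fields_alt (content : String) : List (Int × Int × String) :=
  bLoop content.toList 0 0 0 []

-- ===== PRECONDITION & SPEC =====
def Spec_extract_t_fields (content : String) (out : List (Int × Int × String)) : Prop := out = extract_t_fields_alt content
instance (content : String) (out : List (Int × Int × String)) : Decidable (Spec_extract_t_fields content out) := by unfold Spec_extract_t_fields; infer_instance

-- ===== CLAIM (what is proved, stated in full; the proofs are below) =====
def Claim_equal_extract_t_fields : Prop := ∀ (content : String), Dom_extract_t_fields content → Spec_extract_t_fields content (extract_t_fields content)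

-- ===== LEMMAS AND PROOFS =====

theorem aClose_ge (s : List Char) (j : Nat) : j ≤ aClose s j := by
  induction j using aClose.induct (s := s) with
  | case1 x h h2 ih => rw [aClose]; simp only [h2, if_pos, dif_pos h]; omega
  | case2 x h h2 h3 => rw [aClose]; simp [h, h3]
  | case3 x h h2 h3 ih => rw [aClose]; simp [h, h2, h3]; omega
  | case4 x h => rw [aClose]; simp [h]

theorem aStep?_spec (s : List Char) (i : Nat) (st : Nat) (hi : i ≤ s.length)
    (h : aStep? s i = some st) : i + 4 ≤ st ∧ st < s.length := by
  unfold aStep? at h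
  simp only [] at h
  split at h
  · exact absurd h (by simp)
  · rename_i hidx
    obtain ⟨hle, hpre, -⟩ := PySem.Chars.findFrom_natCast_spec s ['"', 't', '"', ':'] i hi hidx
    set idx := PySem.Chars.findFrom s ['"', 't', '"', ':'] (i : Int) none with hidxdef
    have hidx0 : 0 ≤ idx := le_trans (by positivity) hle
    have hlen4 : idx.toNat + 4 ≤ s.length := by
      have := hpre.length_le
      simp at this; omega
    have hcast : idx + 4 = ((idx.toNat + 4 : Nat) : Int) := by omega
    rw [hcast] at h
    split at h
    · exact absurd h (by simp)
    · rename_i hst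
      obtain ⟨hle2, hpre2, -⟩ :=
        PySem.Chars.findFrom_natCast_spec s ['"'] (idx.toNat + 4) hlen4 hst
      set stI := PySem.Chars.findFrom s ['"'] ((idx.toNat + 4 : Nat) : Int) none
      have hst0 : 0 ≤ stI := le_trans (by positivity) hle2
      have hlt : stI.toNat < s.length := by
        have := hpre2.length_le
        simp at this; omega
      have hstv : st = stI.toNat := by simpa using h.symm
      constructor
      · omega
      · omega

theorem findFrom_len (s sub : List Char) (hsub : sub ≠ []) :
    PySem.Chars.findFrom s sub (s.length : Int) none = -1 := by
  rw [PySem.Chars.findFrom_natCast_eq_neg_one_iff s sub s.length le_rfl, List.drop_length]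
  exact fun h => hsub (List.eq_nil_of_infix_nil h)

theorem findFrom_uniq (s sub : List Char) (k : Nat) (hk : k ≤ s.length) (r : Nat)
    (hkr : k ≤ r) (hpre : sub <+: s.drop r) (hmin : ∀ i, k ≤ i → i < r → ¬ sub <+: s.drop i) :
    PySem.Chars.findFrom s sub (k : Int) none = (r : Int) := by
  have hinf : sub <:+: List.drop k s := by
    have h2 : sub <+: (s.drop k).drop (r - k) := by
      rw [List.drop_drop]
      have : k + (r - k) = r := by omega
      rw [this]; exact hpre
    exact h2.isInfix.trans ((s.drop k).drop_suffix (r - k)).isInfix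
  have hne : PySem.Chars.findFrom s sub (k : Int) none ≠ -1 := by
    rw [Ne, PySem.Chars.findFrom_natCast_eq_neg_one_iff s sub k hk]
    exact fun h => h hinf
  obtain ⟨hle, hpre', hmin'⟩ := PySem.Chars.findFrom_natCast_spec s sub k hk hne
  set f := PySem.Chars.findFrom s sub (k : Int) none with hf
  have h0 : 0 ≤ f := le_trans (by positivity) hle
  have hkf : k ≤ f.toNat := by omega
  have : f.toNat = r := by
    rcases lt_trichotomy f.toNat r with h | h | h
    · exact absurd hpre' (hmin f.toNat hkf h)
    · exact h
    · exact absurd hpre (hmin' r hkr h)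
  omega

theorem infix_drop_iff (x sub : List Char) : sub <:+: x ↔ ∃ j, sub <+: x.drop j := by
  rw [← PySem.Chars.isIn_iff_infix, ← PySem.Chars.exists_prefix_drop_iff_isIn]

theorem findFrom_step (s sub : List Char) (k : Nat) (hk : k < s.length) :
    PySem.Chars.findFrom s sub (k : Int) none =
      if sub <+: s.drop k then (k : Int) else PySem.Chars.findFrom s sub ((k + 1 : Nat) : Int) none := by
  split
  · rename_i hp
    exact findFrom_uniq s sub k (by omega) k le_rfl hp (by omega)
  · rename_i hp
    by_cases h1 : PySem.Chars.findFrom s sub ((k + 1 : Nat) : Int) none = -1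
    · rw [h1, PySem.Chars.findFrom_natCast_eq_neg_one_iff s sub k (by omega)]
      rw [PySem.Chars.findFrom_natCast_eq_neg_one_iff s sub (k+1) (by omega)] at h1
      intro hinf
      obtain ⟨j, hj⟩ := (infix_drop_iff _ _).mp hinf
      rw [List.drop_drop] at hj
      rcases Nat.eq_zero_or_pos j with rfl | hjpos
      · exact hp hj
      · refine h1 ((infix_drop_iff _ _).mpr ⟨j - 1, ?_⟩)
        rw [List.drop_drop]
        have : k + 1 + (j - 1) = k + j := by omega
        rw [this]; exact hj
    · obtain ⟨hle, hpre, hmin⟩ := PySem.Chars.findFrom_natCast_spec s sub (k+1) (by omega) h1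
      set r := PySem.Chars.findFrom s sub ((k + 1 : Nat) : Int) none with hr
      have h0 : 0 ≤ r := le_trans (by positivity) hle
      have heq : PySem.Chars.findFrom s sub (k : Int) none = (r.toNat : Int) := by
        refine findFrom_uniq s sub k (by omega) r.toNat (by omega) hpre ?_
        intro i hki hir
        rcases Nat.eq_or_lt_of_le hki with rfl | h2
        · exact hp
        · exact hmin i h2 hir
      rw [heq]; omega

theorem quote_prefix_iff (s : List Char) (k : Nat) (hk : k < s.length) :
    ['"'] <+: s.drop k ↔ s[k] = '"' := by
  rw [← List.getElem_cons_drop (as := s) (i := k) (h := hk), List.cons_prefix_cons]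
  simp [eq_comm]

theorem mode2_eq (s : List Char) (start : Nat) (acc : List (Int × Int × String)) (j : Nat) :
    bLoop s j 2 start acc =
      if aClose s j < s.length then
        bLoop s (aClose s j + 1) 0 start
          (acc ++ [((start : Int), ((aClose s j : Nat) : Int),
            String.ofList (PySem.List.slice s (some ((start : Int) + 1)) (some ((aClose s j : Nat) : Int))))])
      else
        acc ++ [((start : Int), ((aClose s j : Nat) : Int),
          String.ofList (PySem.List.slice s (some ((start : Int) + 1)) (some ((aClose s j : Nat) : Int))))] := by
  by_cases h : j < s.length
  · rw [bLoop]
    simp only [dif_pos h]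
    by_cases hb : s[j] = '\\'
    · have ha : aClose s j = aClose s (j + 2) := by rw [aClose]; simp [h, hb]
      rw [ha, ← mode2_eq s start acc (j + 2)]
      simp [hb]
    · by_cases hq : s[j] = '"'
      · have ha : aClose s j = j := by rw [aClose]; simp [h, hq]
        rw [ha]
        simp [hq, h]
      · have ha : aClose s j = aClose s (j + 1) := by rw [aClose]; simp [h, hb, hq]
        rw [ha, ← mode2_eq s start acc (j + 1)]
        simp [hb, hq]
  · have ha : aClose s j = j := by rw [aClose]; simp [h]
    rw [bLoop, ha]
    simp [h]
termination_by s.length - j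
decreasing_by all_goals omega

theorem mode1_eq (s : List Char) (start₀ : Nat) (acc : List (Int × Int × String)) (k : Nat)
    (hk : k ≤ s.length) :
    bLoop s k 1 start₀ acc =
      if PySem.Chars.findFrom s ['"'] (k : Int) none = -1 then acc
      else
        bLoop s ((PySem.Chars.findFrom s ['"'] (k : Int) none).toNat + 1) 2
          (PySem.Chars.findFrom s ['"'] (k : Int) none).toNat acc := by
  by_cases h : k < s.length
  · rw [bLoop]
    simp only [dif_pos h]
    rw [findFrom_step s ['"'] k h]
    by_cases hq : s[k] = '"'
    · rw [if_pos ((quote_prefix_iff s k h).mpr hq)]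
      simp [hq]
    · rw [if_neg (fun hp => hq ((quote_prefix_iff s k h).mp hp))]
      rw [mode1_eq s start₀ acc (k + 1) (by omega)]
      simp [hq]
  · have hk' : k = s.length := by omega
    subst hk'
    rw [bLoop, findFrom_len s ['"'] (by simp)]
    simp
termination_by s.length - k
decreasing_by all_goals omega

theorem marker_prefix_iff (s : List Char) (k : Nat) (hk : k < s.length) :
    (s[k] = '"' ∧ PySem.List.slice s (some (k : Int)) (some ((k : Int) + 4)) = ['"', 't', '"', ':'])
      ↔ ['"', 't', '"', ':'] <+: s.drop k := by
  have hc : ((k : Int) + 4) = ((k + 4 : Nat) : Int) := by push_cast; ring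
  rw [hc, PySem.List.slice_natCast]
  have h4 : k + 4 - k = 4 := by omega
  rw [h4]
  constructor
  · rintro ⟨-, hsl⟩
    rw [List.prefix_iff_eq_take]
    exact hsl.symm
  · intro hp
    refine ⟨?_, ?_⟩
    · have := (List.prefix_iff_eq_take.mp hp)
      rw [← List.getElem_cons_drop (as := s) (i := k) (h := hk), List.cons_prefix_cons] at hp
      exact hp.1.symm
    · exact (List.prefix_iff_eq_take.mp hp).symm
  
theorem mode0_eq (s : List Char) (start₀ : Nat) (acc : List (Int × Int × String)) (k : Nat)
    (hk : k ≤ s.length) :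
    bLoop s k 0 start₀ acc =
      if PySem.Chars.findFrom s ['"', 't', '"', ':'] (k : Int) none = -1 then acc
      else
        bLoop s ((PySem.Chars.findFrom s ['"', 't', '"', ':'] (k : Int) none).toNat + 4) 1
          start₀ acc := by
  by_cases h : k < s.length
  · rw [bLoop]
    simp only [dif_pos h]
    rw [findFrom_step s ['"', 't', '"', ':'] k h]
    by_cases hm : ['"', 't', '"', ':'] <+: s.drop k
    · rw [if_pos hm]
      rw [if_pos ((marker_prefix_iff s k h).mpr hm)]
      simp
    · rw [if_neg hm]
      rw [if_neg (fun hc => hm ((marker_prefix_iff s k h).mp hc))]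
      rw [mode0_eq s start₀ acc (k + 1) (by omega)]
      simp
  · have hk' : k = s.length := by omega
    subst hk'
    rw [bLoop, findFrom_len s ['"', 't', '"', ':'] (by simp)]
    simp
termination_by s.length - k
decreasing_by all_goals omega

theorem aOuter_nil (s : List Char) (f : Nat) (i : Nat) (h : ¬ i < s.length) :
    aOuter s f i = [] := by
  cases f with
  | zero => rfl
  | succ f => rw [aOuter]; simp [h]

theorem main_eq (s : List Char) (fuel : Nat) (i : Nat) (start₀ : Nat)
    (acc : List (Int × Int × String)) (hf : s.length - i < fuel) :
    bLoop s i 0 start₀ acc = acc ++ aOuter s fuel i := by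
  induction fuel generalizing i start₀ acc with
  | zero => omega
  | succ f ih =>
    by_cases h : i < s.length
    · rw [mode0_eq s start₀ acc i (by omega)]
      cases hstep : aStep? s i with
      | none =>
        have hA : aOuter s (f + 1) i = [] := by
          rw [aOuter]; simp only [if_pos h]
          split <;> simp_all
        rw [hA, List.append_nil]
        unfold aStep? at hstep
        simp only [] at hstep
        split at hstep
        · rename_i hidx
          simp [hidx]
        · rename_i hidx
          split at hstep
          · rename_i hst
            rw [if_neg hidx]
            obtain ⟨hle, hpre, -⟩ := PySem.Chars.findFrom_natCast_spec s ['"', 't', '"', ':'] i (by omega) hidx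
            set idx := PySem.Chars.findFrom s ['"', 't', '"', ':'] (i : Int) none with hidxdef
            have hidx0 : 0 ≤ idx := le_trans (by positivity) hle
            have hlen4 : idx.toNat + 4 ≤ s.length := by
              have := hpre.length_le; simp at this; omega
            rw [mode1_eq s start₀ acc (idx.toNat + 4) hlen4]
            have hcast : ((idx.toNat + 4 : Nat) : Int) = idx + 4 := by omega
            rw [hcast, if_pos hst]
          · simp at hstep
      | some st =>
        obtain ⟨hist, hstlt⟩ := aStep?_spec s i st (by omega) hstep
        have hA : aOuter s (f + 1) i =
            ((st : Int), ((aClose s (st + 1) : Nat) : Int),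
              String.ofList (PySem.List.slice s (some ((st : Int) + 1)) (some ((aClose s (st + 1) : Nat) : Int))))
              :: aOuter s f (aClose s (st + 1) + 1) := by
          rw [aOuter]; simp only [if_pos h]
          split <;> simp_all
        rw [hA]
        unfold aStep? at hstep
        simp only [] at hstep
        split at hstep
        · simp at hstep
        · rename_i hidx
          rw [if_neg hidx]
          obtain ⟨hle, hpre, -⟩ := PySem.Chars.findFrom_natCast_spec s ['"', 't', '"', ':'] i (by omega) hidx
          set idx := PySem.Chars.findFrom s ['"', 't', '"', ':'] (i : Int) none with hidxdef
          have hidx0 : 0 ≤ idx := le_trans (by positivity) hle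
          have hlen4 : idx.toNat + 4 ≤ s.length := by
            have := hpre.length_le; simp at this; omega
          rw [mode1_eq s start₀ acc (idx.toNat + 4) hlen4]
          have hcast : ((idx.toNat + 4 : Nat) : Int) = idx + 4 := by omega
          rw [hcast]
          split at hstep
          · simp at hstep
          · rename_i hst
            rw [if_neg hst]
            have hstv : (PySem.Chars.findFrom s ['"'] (idx + 4) none).toNat = st := by
              simpa using hstep
            rw [hstv]
            rw [mode2_eq s st acc (st + 1)]
            have hge := aClose_ge s (st + 1)
            by_cases hcl : aClose s (st + 1) < s.length
            · rw [if_pos hcl]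
              rw [ih (aClose s (st + 1) + 1) st
                  (acc ++ [((st : Int), ((aClose s (st + 1) : Nat) : Int),
                    String.ofList (PySem.List.slice s (some ((st : Int) + 1)) (some ((aClose s (st + 1) : Nat) : Int))))])
                  (by omega)]
              simp
            · rw [if_neg hcl]
              rw [aOuter_nil s f (aClose s (st + 1) + 1) (by omega)]
    · rw [bLoop, aOuter_nil s (f + 1) i h]
      simp [h]

-- ===== VERDICT (by name: the statement is the Claim_ definition above) =====
theorem extract_t_fields_spec : Claim_equal_extract_t_fields := by
  intro content _
  unfold Spec_extract_t_fields extract_t_fields extract_t_fields_alt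
  rw [main_eq content.toList (content.toList.length + 1) 0 0 [] (by omega)]
  simp
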